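-- pv_equiv track=rewrite | github.com/jinyoong/SWEA | problem/D4/4613. 러시아국기 같은 깃발.py | need_paint
-- ===== SOURCE A (Python) =====
-- def need_paint(lst):  # 현재 줄을 하얀색, 파란색, 빨간색으로 칠하는데 필요한 칸의 개수를 반환
--     need_w = need_b = need_r = 0
--     for color in lst:
--         if color != 'W':
--             need_w += 1
--         if color != 'B':
--             need_b += 1
--         if color != 'R':
--             need_r += 1
--     return [need_w, need_b, need_r]
-- ===== SOURCE B (Python) =====
-- def need_paint(lst):
--     freq = {}
--     for color in lst:
--         freq[color] = freq.get(color, 0) + 1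
--     n = len(lst)
--     return [n - freq.get(c, 0) for c in ('W', 'B', 'R')]
-- ===== Notes on version B (the rewrite author's own statement) =====
-- stated objective: alternative
-- what changed: Builds a frequency dictionary of all colors in one pass, then derives each of the three answers by subtracting the table entry from the length, instead of three per-element mismatch conditionals.
import Mathlib
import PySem

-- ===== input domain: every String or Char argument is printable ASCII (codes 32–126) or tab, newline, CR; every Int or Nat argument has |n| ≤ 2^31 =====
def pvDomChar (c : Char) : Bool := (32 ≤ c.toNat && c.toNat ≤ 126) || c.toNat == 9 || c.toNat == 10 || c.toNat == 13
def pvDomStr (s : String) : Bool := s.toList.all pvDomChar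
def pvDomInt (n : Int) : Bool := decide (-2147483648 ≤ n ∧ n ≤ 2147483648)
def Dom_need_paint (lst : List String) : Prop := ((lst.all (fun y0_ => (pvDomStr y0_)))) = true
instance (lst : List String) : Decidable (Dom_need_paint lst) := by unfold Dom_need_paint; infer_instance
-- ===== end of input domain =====

-- B builds a frequency dictionary in one pass and derives each answer by subtraction from the length (objective: alternative decomposition).

-- ===== PORT A =====
def need_paint (lst : List String) : List Int :=
  let s := lst.foldl (fun (acc : Int × Int × Int) color =>
      (if color ≠ "W" then acc.1 + 1 else acc.1,
       if color ≠ "B" then acc.2.1 + 1 else acc.2.1,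
       if color ≠ "R" then acc.2.2 + 1 else acc.2.2)) (0, 0, 0)
  [s.1, s.2.1, s.2.2]

-- ===== PORT B =====
def need_paint_alt (lst : List String) : List Int :=
  let freq := lst.foldl (fun (d : PySem.Dict String Int) color =>
      d.insert color (d.getD color 0 + 1)) PySem.Dict.empty
  let n : Int := lst.length
  ["W", "B", "R"].map (fun c => n - freq.getD c 0)

-- ===== PRECONDITION & SPEC =====
def Spec_need_paint (lst : List String) (out : List Int) : Prop := out = need_paint_alt lst
instance (lst : List String) (out : List Int) : Decidable (Spec_need_paint lst out) := by unfold Spec_need_paint; infer_instance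

-- ===== CLAIM =====
def Claim_equal_need_paint : Prop := ∀ (lst : List String), Dom_need_paint lst → Spec_need_paint lst (need_paint lst)

-- ===== LEMMAS AND PROOFS =====
theorem need_paint_fold (lst : List String) (a b c : Int) :
    lst.foldl (fun (acc : Int × Int × Int) color =>
      (if color ≠ "W" then acc.1 + 1 else acc.1,
       if color ≠ "B" then acc.2.1 + 1 else acc.2.1,
       if color ≠ "R" then acc.2.2 + 1 else acc.2.2)) (a, b, c)
    = (a + lst.length - lst.count "W",
       b + lst.length - lst.count "B",
       c + lst.length - lst.count "R") := by
  induction lst generalizing a b c with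
  | nil => simp
  | cons x xs ih =>
    simp only [List.foldl_cons, ih, List.count_cons]
    by_cases hw : x = "W" <;> by_cases hb : x = "B" <;> by_cases hr : x = "R" <;>
      simp [hw, hb, hr, Prod.ext_iff] <;> push_cast <;> omega

-- ===== VERDICT =====
theorem need_paint_spec : Claim_equal_need_paint := by
  intro lst _
  show _ = _
  unfold need_paint need_paint_alt
  rw [need_paint_fold]
  simp [PySem.Dict.getD_foldl_insert_add_one, List.map]
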